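-- pv_equiv track=rewrite | github.com/bb9642/polygraphic-substitution-cipher-code | twoSquare.py | table_creation
-- ===== SOURCE A (Python) =====
-- def table_creation(key):
-- 	"a 5x5 matrix is created using the key given"
-- 	table = [[0] * 5 for row in range(5)]
-- 	alph="abcdefghijklmnoprstuvwxyz"
-- 	key=key.replace(" ","")
-- 	key.lower()
-- 	for i in range(0,5):
-- 		for j in range(0,5):
-- 			if len(key):
-- 				table[i][j]=key[0]
-- 				alph=alph.replace(key[0],'')
-- 				key=key.replace(key[0],'')
-- 			else:
-- 				table[i][j]=alph[0]
-- 				alph=alph[1:]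
-- 	return table
-- ===== SOURCE B (Python) =====
-- def table_creation(key):
--     "a 5x5 matrix is created using the key given"
--     seen = []
--     for c in key.replace(" ", ""):
--         if c not in seen:
--             seen.append(c)
--     flat = (seen + [c for c in "abcdefghijklmnoprstuvwxyz" if c not in seen])[:25]
--     return [flat[r * 5:(r + 1) * 5] for r in range(5)]
-- ===== Notes on version B (the rewrite author's own statement) =====
-- stated objective: simpler
-- what changed: A fills the 5x5 table cell by cell with a nested loop that mutates key and alph via str.replace at every cell; B instead builds the flat 25-character sequence once (first-occurrence dedup of the space-stripped key, then the unused alphabet letters) and reshapes it into 5 rows by slicing.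
import Mathlib
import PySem

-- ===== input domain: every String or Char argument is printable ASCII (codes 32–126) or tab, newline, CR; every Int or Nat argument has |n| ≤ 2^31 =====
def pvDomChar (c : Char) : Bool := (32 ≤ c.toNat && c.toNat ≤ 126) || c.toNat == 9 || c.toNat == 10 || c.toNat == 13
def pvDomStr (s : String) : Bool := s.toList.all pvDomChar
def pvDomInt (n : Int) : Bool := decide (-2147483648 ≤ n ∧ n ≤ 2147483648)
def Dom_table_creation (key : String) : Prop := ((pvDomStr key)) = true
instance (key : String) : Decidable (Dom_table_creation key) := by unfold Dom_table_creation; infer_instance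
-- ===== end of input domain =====

-- B replaces A's cell-by-cell nested loop with str.replace mutation by a build-flat-then-reshape
-- decomposition (ordered dedup of the key, leftover alphabet, reshape into 5 rows); objective: simpler.

-- ===== PORT A =====
-- one cell of A's nested loop: fills table[i][j] and updates (key, alph)
def tcCellA (st : List String × List Char × List Char) (_ : Int) : List String × List Char × List Char :=
  let row := st.1
  let key := st.2.1
  let alph := st.2.2
  if key.length ≠ 0 then
    let c := (PySem.List.pyGet? key 0).getD ' '   -- key[0], guarded by `if len(key)`
    (row ++ [String.ofList [c]], PySem.Chars.replace key [c] [], PySem.Chars.replace alph [c] [])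
  else
    -- alph[0] / alph[1:]; alph is never empty when this branch runs (A never raises)
    (row ++ [String.ofList [(PySem.List.pyGet? alph 0).getD ' ']], key, PySem.List.slice alph (some 1) none)

-- one row of A's outer loop: the inner `for j in range(0,5)` filling table[i][0..4]
def tcRowA (st : List (List String) × List Char × List Char) (_ : Int) :
    List (List String) × List Char × List Char :=
  let inner := (PySem.List.pyRange 0 5 1).foldl tcCellA ([], st.2.1, st.2.2)
  (st.1 ++ [inner.1], inner.2)

-- `table = [[0]*5 for row in range(5)]`: every cell is assigned before A returns, so the rows
-- are built directly; `key.lower()` discards its result in A and is dropped here too.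
def table_creation (key : String) : List (List String) :=
  let alph := "abcdefghijklmnoprstuvwxyz".toList
  let key1 := PySem.Chars.replace key.toList [' '] []
  ((PySem.List.pyRange 0 5 1).foldl tcRowA ([], key1, alph)).1

-- ===== PORT B =====
-- Python's characters are 1-char strings; the port keeps Char and wraps each cell with String.ofList.
def table_creation_alt (key : String) : List (List String) :=
  let seen := (PySem.Chars.replace key.toList [' '] []).foldl
      (fun s c => if c ∈ s then s else s ++ [c]) []
  let flat := (seen ++ ("abcdefghijklmnoprstuvwxyz".toList.filter (fun c => c ∉ seen))).take 25
  (List.range 5).map (fun r => ((flat.drop (r * 5)).take 5).map (fun c => String.ofList [c]))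

-- ===== PRECONDITION & SPEC =====
def Spec_table_creation (key : String) (out : List (List String)) : Prop := out = table_creation_alt key
instance (key : String) (out : List (List String)) : Decidable (Spec_table_creation key out) := by unfold Spec_table_creation; infer_instance

-- ===== CLAIM (what is proved, stated in full; the proofs are below) =====
def Claim_equal_table_creation : Prop := ∀ (key : String), Dom_table_creation key → Spec_table_creation key (table_creation key)

-- ===== LEMMAS AND PROOFS =====

-- first-occurrence dedup, in A's "remove all copies of the head" shape
def kdedup : List Char → List Char
  | [] => []
  | c :: rest => c :: kdedup (rest.filter (fun x => x ≠ c))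
termination_by l => l.length
decreasing_by
  simp only [List.length_cons, Nat.lt_succ_iff]
  simpa using List.length_filter_le _ rest.attach

-- the flat 25+ character stream both programs emit
def flatSeq (key alph : List Char) : List Char :=
  kdedup key ++ alph.filter (fun c => c ∉ kdedup key)

theorem go_single (c : Char) : ∀ fuel (l acc : List Char), l.length ≤ fuel →
    PySem.Chars.replace.go [c] [] fuel l acc = acc.reverse ++ l.filter (fun x => x ≠ c) := by
  intro fuel
  induction fuel with
  | zero => intro l acc h; rw [PySem.Chars.replace.go.eq_def]; simp at h; simp [h]
  | succ n ih =>
    intro l acc h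
    rw [PySem.Chars.replace.go.eq_def]
    cases l with
    | nil => simp
    | cons x t =>
      simp only [List.isPrefixOf, Bool.and_true]
      by_cases hx : c = x
      · subst hx
        simp only [beq_self_eq_true, if_pos, List.length_cons, List.length_nil, List.drop_succ_cons,
          List.drop_zero, List.reverse_nil, List.nil_append]
        rw [ih t acc (by simpa using Nat.le_of_succ_le_succ h)]
        simp
      · have : (c == x) = false := by simp [hx]
        simp only [this, Bool.false_eq_true, ite_false]
        rw [ih t (x :: acc) (by simpa using Nat.le_of_succ_le_succ h)]
        simp [Ne.symm hx]

theorem replace_single (cs : List Char) (c : Char) :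
    PySem.Chars.replace cs [c] [] = cs.filter (fun x => x ≠ c) := by
  rw [PySem.Chars.replace]
  simp [go_single c cs.length cs [] le_rfl]

theorem foldl_seen (l : List Char) : ∀ (acc : List Char),
    l.foldl (fun s c => if c ∈ s then s else s ++ [c]) acc
      = acc ++ kdedup (l.filter (fun c => c ∉ acc)) := by
  induction l with
  | nil => intro acc; simp [kdedup]
  | cons c rest ih =>
    intro acc
    simp only [List.foldl_cons, List.filter_cons]
    by_cases hc : c ∈ acc
    · have : (decide (c ∉ acc)) = false := by simp [hc]
      rw [if_pos hc, this]
      simp only [Bool.false_eq_true, ite_false]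
      exact ih acc
    · have hd : (decide (c ∉ acc)) = true := by simp [hc]
      rw [if_neg hc, hd]
      simp only [ite_true]
      rw [ih (acc ++ [c]), kdedup]
      have hf : rest.filter (fun x => decide (x ∉ acc ++ [c]))
          = (rest.filter (fun x => decide (x ∉ acc))).filter (fun x => x ≠ c) := by
        rw [List.filter_filter]
        apply List.filter_congr
        intro x _
        simp [List.mem_append, and_comm, not_or]
      rw [hf]
      simp

theorem seen_eq_kdedup (l : List Char) :
    l.foldl (fun s c => if c ∈ s then s else s ++ [c]) [] = kdedup l := by
  rw [foldl_seen]
  simp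

theorem step_lemma (row : List String) (key alph : List Char) (d : Char) (ds : List Char) (e : Int)
    (h : flatSeq key alph = d :: ds) :
    ∃ key₂ alph₂, tcCellA (row, key, alph) e = (row ++ [String.ofList [d]], key₂, alph₂)
      ∧ flatSeq key₂ alph₂ = ds := by
  cases key with
  | nil =>
    have ha : alph = d :: ds := by
      simpa [flatSeq, kdedup] using h
    refine ⟨[], ds, ?_, ?_⟩
    · subst ha
      simp [tcCellA, pysem, PySem.List.slice_from_one]
    · simp [flatSeq, kdedup]
  | cons c rest =>
    have hk : kdedup (c :: rest) = c :: kdedup (rest.filter (fun x => x ≠ c)) := by rw [kdedup]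
    rw [flatSeq, hk, List.cons_append] at h
    obtain ⟨hd, hds⟩ := List.cons.inj h
    subst hd
    refine ⟨rest.filter (fun x => x ≠ c), alph.filter (fun x => x ≠ c), ?_, ?_⟩
    · have hrep : PySem.Chars.replace (c :: rest) [c] [] = rest.filter (fun x => x ≠ c) := by
        rw [replace_single]
        simp
      have hg : (PySem.List.pyGet? (c :: rest) 0).getD ' ' = c := by
        simp [PySem.List.pyGet?, PySem.List.pyIdx?]
      have hrepa : PySem.Chars.replace alph [c] [] = alph.filter (fun x => x ≠ c) :=
        replace_single alph c
      simp only [tcCellA, List.length_cons, hg, hrep, hrepa]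
      simp
    · rw [flatSeq, ← hds]
      congr 1
      rw [List.filter_filter]
      apply List.filter_congr
      intro x _
      simp [List.mem_cons, not_or, Bool.and_comm]

theorem inner_fold (L : List Int) : ∀ (row : List String) (key alph : List Char),
    L.length ≤ (flatSeq key alph).length →
    ∃ key' alph',
      L.foldl tcCellA (row, key, alph)
        = (row ++ ((flatSeq key alph).take L.length).map (fun c => String.ofList [c]), key', alph')
      ∧ flatSeq key' alph' = (flatSeq key alph).drop L.length := by
  induction L with
  | nil => intro row key alph _; exact ⟨key, alph, by simp, by simp⟩
  | cons e L ih =>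
    intro row key alph h
    obtain ⟨d, ds, hF⟩ : ∃ d ds, flatSeq key alph = d :: ds := by
      cases hF : flatSeq key alph with
      | nil => rw [hF] at h; simp at h
      | cons d ds => exact ⟨d, ds, rfl⟩
    obtain ⟨k₂, a₂, hstep, hF₂⟩ := step_lemma row key alph d ds e hF
    rw [List.foldl_cons, hstep]
    have hlen : L.length ≤ (flatSeq k₂ a₂).length := by
      rw [hF₂]
      rw [hF] at h
      simp only [List.length_cons] at h
      omega
    obtain ⟨k₃, a₃, hfold, hF₃⟩ := ih (row ++ [String.ofList [d]]) k₂ a₂ hlen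
    refine ⟨k₃, a₃, ?_, ?_⟩
    · rw [hfold, hF, hF₂]
      simp [List.map_cons]
    · rw [hF₃, hF₂, hF]
      simp

theorem nodup_length_le (l D : List Char) (h : l.Nodup) (hs : l ⊆ D) : l.length ≤ D.length := by
  classical
  calc l.length = l.toFinset.card := (List.toFinset_card_of_nodup h).symm
  _ ≤ D.toFinset.card := Finset.card_le_card (by intro x hx; simp at hx ⊢; exact hs hx)
  _ ≤ D.length := D.toFinset_card_le

theorem flatSeq_len (key alph : List Char) (h : alph.Nodup) :
    alph.length ≤ (flatSeq key alph).length := by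
  rw [flatSeq, List.length_append]
  have hsplit : alph.length = (alph.filter (fun c => decide (c ∈ kdedup key))).length
      + (alph.filter (fun c => !decide (c ∈ kdedup key))).length :=
    List.length_eq_length_filter_add _
  have hle : (alph.filter (fun c => decide (c ∈ kdedup key))).length ≤ (kdedup key).length := by
    apply nodup_length_le _ _ (h.filter _)
    intro x hx
    simpa using (List.mem_filter.1 hx).2
  have : (alph.filter (fun c => c ∉ kdedup key)).length
      = (alph.filter (fun c => !decide (c ∈ kdedup key))).length := by
    simp
  omega

theorem outer_fold (L : List Int) : ∀ (rows : List (List String)) (key alph : List Char),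
    5 * L.length ≤ (flatSeq key alph).length →
    ∃ key' alph',
      L.foldl tcRowA (rows, key, alph)
        = (rows ++ (List.range L.length).map
            (fun r => (((flatSeq key alph).drop (5 * r)).take 5).map (fun c => String.ofList [c])),
           key', alph')
      ∧ flatSeq key' alph' = (flatSeq key alph).drop (5 * L.length) := by
  induction L with
  | nil => intro rows key alph _; exact ⟨key, alph, by simp, by simp⟩
  | cons e L ih =>
    intro rows key alph h
    have hlen5 : (PySem.List.pyRange 0 5 1).length = 5 := by decide
    have hb : (PySem.List.pyRange 0 5 1).length ≤ (flatSeq key alph).length := by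
      rw [hlen5]; simp only [List.length_cons] at h; omega
    obtain ⟨k₂, a₂, h₁, hf₁⟩ := inner_fold (PySem.List.pyRange 0 5 1) [] key alph hb
    have hrow : tcRowA (rows, key, alph) e
        = (rows ++ [((flatSeq key alph).take 5).map (fun c => String.ofList [c])], k₂, a₂) := by
      simp only [tcRowA, h₁, hlen5]
      simp
    have hb₂ : 5 * L.length ≤ (flatSeq k₂ a₂).length := by
      rw [hf₁, hlen5, List.length_drop]
      simp only [List.length_cons] at h
      omega
    obtain ⟨k₃, a₃, h₂, hf₂⟩ := ih (rows ++ [((flatSeq key alph).take 5).map (fun c => String.ofList [c])]) k₂ a₂ hb₂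
    refine ⟨k₃, a₃, ?_, ?_⟩
    · rw [List.foldl_cons, hrow, h₂, hf₁, hlen5]
      simp only [List.length_cons]
      rw [List.range_succ_eq_map]
      simp only [List.map_cons, List.map_map, Nat.mul_zero, List.drop_zero]
      have hfun : (fun r : Nat => List.map (fun c => String.ofList [c])
              (List.take 5 (List.drop (5 * r) (List.drop 5 (flatSeq key alph)))))
          = ((fun r : Nat => List.map (fun c => String.ofList [c])
              (List.take 5 (List.drop (5 * r) (flatSeq key alph)))) ∘ Nat.succ) := by
        funext r
        simp only [Function.comp_apply, List.drop_drop]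
        have h55 : 5 + 5 * r = 5 * r.succ := by omega
        rw [h55]
      rw [hfun]
      simp [List.append_assoc]
    · rw [hf₂, hf₁, hlen5, List.drop_drop]
      congr 1
      simp only [List.length_cons]
      omega

-- ===== VERDICT (by name: the statement is the Claim_ definition above) =====
theorem table_creation_spec : Claim_equal_table_creation := by
  intro key _
  show table_creation key = table_creation_alt key
  simp only [table_creation, table_creation_alt, seen_eq_kdedup]
  have hn : ("abcdefghijklmnoprstuvwxyz".toList : List Char).Nodup := by decide
  have h25 : (25 : Nat) ≤ (flatSeq (PySem.Chars.replace key.toList [' '] [])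
      "abcdefghijklmnoprstuvwxyz".toList).length := by
    simpa using flatSeq_len (PySem.Chars.replace key.toList [' '] []) _ hn
  have hlen5 : (PySem.List.pyRange 0 5 1).length = 5 := by decide
  obtain ⟨k, a, hout, -⟩ := outer_fold (PySem.List.pyRange 0 5 1) []
      (PySem.Chars.replace key.toList [' '] []) "abcdefghijklmnoprstuvwxyz".toList
      (by rw [hlen5]; omega)
  rw [hout, hlen5]
  simp only [List.nil_append]
  have hflat : kdedup (PySem.Chars.replace key.toList [' '] []) ++
      List.filter (fun c => decide (c ∉ kdedup (PySem.Chars.replace key.toList [' '] [])))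
        "abcdefghijklmnoprstuvwxyz".toList
      = flatSeq (PySem.Chars.replace key.toList [' '] []) "abcdefghijklmnoprstuvwxyz".toList := rfl
  rw [hflat]
  apply List.map_congr_left
  intro r hr
  have hr5 : r < 5 := by simpa using hr
  have hdt : (((flatSeq (PySem.Chars.replace key.toList [' '] [])
        "abcdefghijklmnoprstuvwxyz".toList).take 25).drop (r * 5))
      = ((flatSeq (PySem.Chars.replace key.toList [' '] [])
        "abcdefghijklmnoprstuvwxyz".toList).drop (r * 5)).take (25 - r * 5) := by
    rw [List.drop_take]
  rw [hdt, List.take_take]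
  have h1 : min 5 (25 - r * 5) = 5 := by omega
  have h2 : r * 5 = 5 * r := Nat.mul_comm r 5
  rw [h1, h2]
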